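-- pv_equiv track=rewrite | github.com/kumarg160491/Learn_classes | Array_problems/array14.py | least_occurance
-- ===== SOURCE A (Python) =====
-- def least_occurance(lst):
--     temp = {}
--     least_number = []
--     result = []
--     for i in lst:
--         if i in temp:
--             temp[i] = temp[i] + 1
--         else:
--             temp[i] = 1
--     # for key, value in temp.items():
--     #     least_number.append(value)
--     least_number = temp.values()
--     least_number = list(least_number)
--     least_number.sort()
--     least_number = least_number[0]
--     for key, value in temp.items():
--         if value == least_number:
--             result.append(key)
--     result.sort(reverse=True)
--     return result
-- ===== SOURCE B (Python) =====
-- def least_occurance(lst):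
--     counts = {}
--     for i in lst:
--         counts[i] = counts.get(i, 0) + 1
--     index = {}
--     for key, value in counts.items():
--         index.setdefault(value, []).append(key)
--     min_count = sorted(index)[0]
--     return sorted(index[min_count], reverse=True)
-- ===== Notes on version B (the rewrite author's own statement) =====
-- stated objective: alternative
-- what changed: B inverts the count dict into a count->keys index and picks the minimum-count bucket directly, instead of A's separate sort-all-values min-find followed by a filtering scan over the items.
import Mathlib
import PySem

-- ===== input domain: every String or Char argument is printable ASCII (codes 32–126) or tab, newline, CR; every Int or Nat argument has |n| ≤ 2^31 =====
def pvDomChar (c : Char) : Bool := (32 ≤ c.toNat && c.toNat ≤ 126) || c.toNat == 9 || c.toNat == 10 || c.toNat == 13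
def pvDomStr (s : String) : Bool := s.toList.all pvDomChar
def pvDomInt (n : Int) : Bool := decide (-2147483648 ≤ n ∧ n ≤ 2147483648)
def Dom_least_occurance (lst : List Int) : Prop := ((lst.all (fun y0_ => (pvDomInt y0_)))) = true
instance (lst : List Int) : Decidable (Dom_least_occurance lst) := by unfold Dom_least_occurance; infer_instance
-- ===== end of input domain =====

-- B replaces A's sort-all-values min-find + filtering scan by a count->keys inverted index
-- whose minimum bucket is selected directly (objective: alternative decomposition, same cost).


-- ===== PORT A =====
def least_occurance (lst : List Int) : List Int :=
  let temp := lst.foldl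
    (fun d i => if d.contains i then d.insert i (d.getD i 0 + 1) else d.insert i 1)
    (PySem.Dict.empty : PySem.Dict Int Int)
  let leastNumbers := PySem.List.sorted temp.values (fun x => x) false
  match PySem.List.pyGet? leastNumbers 0 with
  | none => []   -- Python raises IndexError here (only when lst = []); excluded by Pre_
  | some least =>
    let result := temp.items.foldl
      (fun acc p => if p.2 == least then acc ++ [p.1] else acc) ([] : List Int)
    PySem.List.sorted result (fun x => x) true

-- ===== PORT B =====
def least_occurance_alt (lst : List Int) : List Int :=
  let counts := lst.foldl (fun d i => d.insert i (d.getD i 0 + 1))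
    (PySem.Dict.empty : PySem.Dict Int Int)
  let index := counts.items.foldl
    (fun d p => d.modify p.2 ([] : List Int) (fun l => l ++ [p.1]))
    (PySem.Dict.empty : PySem.Dict Int (List Int))
  match PySem.List.pyGet? (PySem.List.sorted index.keys (fun x => x) false) 0 with
  | none => []   -- Python raises IndexError here (only when lst = []); excluded by Pre_
  | some minCount => PySem.List.sorted (index.getD minCount []) (fun x => x) true

-- ===== PRECONDITION & SPEC =====
-- Pre_ excludes only the empty list, on which both A and B raise IndexError.
def Pre_least_occurance (lst : List Int) : Prop := lst ≠ []
instance (lst : List Int) : Decidable (Pre_least_occurance lst) := by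
  unfold Pre_least_occurance; infer_instance
def pvWitness_least_occurance : List Int := [1, 2, 2]

def Spec_least_occurance (lst : List Int) (out : List Int) : Prop := out = least_occurance_alt lst
instance (lst : List Int) (out : List Int) : Decidable (Spec_least_occurance lst out) := by
  unfold Spec_least_occurance; infer_instance

-- ===== CLAIM (what is proved, stated in full; the proofs are below) =====
def Claim_equal_least_occurance : Prop :=
  ∀ (lst : List Int), Dom_least_occurance lst → Pre_least_occurance lst →
    Spec_least_occurance lst (least_occurance lst)

-- ===== LEMMAS AND PROOFS =====

-- A's count loop (membership test then insert) builds the same dict as B's get-default insert loop.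
theorem temp_eq_counts (lst : List Int) :
    lst.foldl (fun d i => if d.contains i then d.insert i (d.getD i 0 + 1) else d.insert i 1)
      (PySem.Dict.empty : PySem.Dict Int Int)
    = lst.foldl (fun d i => d.insert i (d.getD i 0 + 1)) PySem.Dict.empty := by
  apply PySem.List.foldl_congr_mem
  intro d i _
  by_cases h : d.contains i
  · simp [h]
  · rw [PySem.Dict.getD_of_not_contains d 0 (by simpa using h)]
    simp [h]

-- the inverted index (grouping by the SECOND component) looked up at c collects the first components
theorem getD_group_by_snd (l : List (Int × Int)) (d : PySem.Dict Int (List Int)) (c : Int) :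
    (l.foldl (fun d p => d.modify p.2 ([] : List Int) (fun l => l ++ [p.1])) d).getD c []
      = d.getD c [] ++ (l.filter (fun p => p.2 == c)).map (·.1) := by
  induction l generalizing d with
  | nil => simp
  | cons p t ih =>
    simp only [List.foldl_cons, ih, List.filter_cons]
    rw [PySem.Dict.getD_modify]
    by_cases h : c = p.2
    · simp [h, List.append_assoc]
    · simp [h, Ne.symm h]

-- head of sorted(set(xs)) = head of sorted(xs)
theorem head_sorted_set (xs : List Int) (hx : xs ≠ []) :
    PySem.List.pyGet? (PySem.List.sorted (PySem.Set.ofList xs) (fun x => x) false) 0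
      = PySem.List.pyGet? (PySem.List.sorted xs (fun x => x) false) 0 := by
  have hset : PySem.Set.ofList xs ≠ [] := by
    obtain ⟨x, t, rfl⟩ := List.exists_cons_of_ne_nil hx
    intro h
    have : x ∈ PySem.Set.ofList (x :: t) := by
      rw [PySem.Set.mem_ofList]; exact List.mem_cons_self
    simp [h] at this
  have hne1 : PySem.List.sorted (PySem.Set.ofList xs) (fun x => x) false ≠ [] := by
    rw [Ne, PySem.List.sorted_eq_nil_iff]; exact hset
  have hne2 : PySem.List.sorted xs (fun x => x) false ≠ [] := by
    rw [Ne, PySem.List.sorted_eq_nil_iff]; exact hx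
  obtain ⟨a, ta, ha⟩ := List.exists_cons_of_ne_nil hne1
  obtain ⟨b, tb, hb⟩ := List.exists_cons_of_ne_nil hne2
  have hamem : a ∈ xs := by
    have : a ∈ PySem.Set.ofList xs := by
      rw [← PySem.List.mem_sorted (key := fun x => x) (rev := false), ha]
      exact List.mem_cons_self
    rwa [PySem.Set.mem_ofList] at this
  have hbmem : b ∈ PySem.Set.ofList xs := by
    rw [PySem.Set.mem_ofList]
    rw [← PySem.List.mem_sorted (key := fun x => x) (rev := false), hb]
    exact List.mem_cons_self
  have h1 : a ≤ b := PySem.List.key_head_sorted_le _ _ ha b hbmem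
  have h2 : b ≤ a := PySem.List.key_head_sorted_le _ _ hb a hamem
  rw [ha, hb, le_antisymm h1 h2]
  simp [PySem.List.pyGet?, PySem.List.pyIdx?]

-- ===== VERDICT (by name: the statement is the Claim_ definition above) =====
theorem least_occurance_spec : Claim_equal_least_occurance := by
  intro lst _ hpre
  simp only [Spec_least_occurance, least_occurance, least_occurance_alt]
  rw [temp_eq_counts, PySem.Dict.foldl_insert_getD_add_one_eq_counter]
  have hkeys : (List.foldl (fun d p => d.modify p.2 ([] : List Int) (fun l => l ++ [p.1]))
      (PySem.Dict.empty : PySem.Dict Int (List Int)) (PySem.Dict.counter lst).items).keys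
      = PySem.Set.ofList (PySem.Dict.counter lst).values := by
    rw [PySem.Dict.keys_foldl_modify_key (PySem.Dict.counter lst).items (fun p => p.2)
      ([] : List Int) (fun _ p => fun l => l ++ [p.1]) PySem.Dict.empty]
    simp [PySem.Dict.keys_empty, PySem.Set.update, PySem.Set.ofList_eq_foldl, PySem.Dict.values]
  have hvals : (PySem.Dict.counter lst).values ≠ [] := by
    have hlm : lst.head hpre ∈ (PySem.Dict.counter lst).keys := by
      rw [PySem.Dict.keys_counter, PySem.Set.mem_ofList]
      exact List.head_mem hpre
    intro h
    have hk : (PySem.Dict.counter lst).keys = [] := by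
      have hlen := congrArg List.length h
      simpa [PySem.Dict.values, PySem.Dict.keys, List.length_eq_zero_iff] using hlen
    simp [hk] at hlm
  rw [hkeys, head_sorted_set _ hvals]
  cases hm : PySem.List.pyGet? (PySem.List.sorted (PySem.Dict.counter lst).values
      (fun x => x) false) 0 with
  | none => rfl
  | some m =>
    dsimp only
    rw [PySem.List.foldl_append_if (fun p : Int × Int => p.2 == m) (fun p : Int × Int => p.1),
      getD_group_by_snd]
    simp [PySem.Dict.getD_empty]
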